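-- pv_equiv track=rewrite | github.com/JasdeepN/reef | app/routes/home.py | _find_surrounding_values
-- ===== SOURCE A (Python) =====
-- def _find_surrounding_values(values, index):
--     """Find the previous and next non-None values around a given index"""
--     prev_val = prev_idx = next_val = next_idx = None
--
--     # Look backward for previous value
--     for j in range(index - 1, -1, -1):
--         if values[j] is not None:
--             prev_val, prev_idx = values[j], j
--             break
--
--     # Look forward for next value
--     for j in range(index + 1, len(values)):
--         if values[j] is not None:
--             next_val, next_idx = values[j], j
--             break
--
--     return prev_val, prev_idx, next_val, next_idx
-- ===== SOURCE B (Python) =====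
-- def _find_surrounding_values(values, index):
--     """Find the previous and next non-None values around a given index"""
--     known = [(j, v) for j, v in enumerate(values) if v is not None]
--     before = [(j, v) for (j, v) in known if j < index]
--     after = [(j, v) for (j, v) in known if j > index]
--     prev_idx, prev_val = before[-1] if before else (None, None)
--     next_idx, next_val = after[0] if after else (None, None)
--     return prev_val, prev_idx, next_val, next_idx
-- ===== Notes on version B (the rewrite author's own statement) =====
-- stated objective: alternative
-- what changed: B builds one index table of the non-None entries with a single enumerate pass and reads the previous/next neighbor as the last entry below and first entry above the index, replacing A's two bounded directional index scans with values[j] subscripting.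
-- intended difference: For index <= -2 with a non-None value among the positions A's wrapped forward scan visits, A returns that wrapped element with a NEGATIVE next index (e.g. ([some 5], -2) -> (None, None, 5, -1)), an artefact of Python negative-index wraparound; B returns the first non-None entry with its true non-negative position ((None, None, 5, 0)), which is the intended 'next value after the index'. — e.g. on _find_surrounding_values([some 5], -2): A returns (none, none, some 5, some (-1)), B returns (none, none, some 5, some 0)
import Mathlib
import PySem

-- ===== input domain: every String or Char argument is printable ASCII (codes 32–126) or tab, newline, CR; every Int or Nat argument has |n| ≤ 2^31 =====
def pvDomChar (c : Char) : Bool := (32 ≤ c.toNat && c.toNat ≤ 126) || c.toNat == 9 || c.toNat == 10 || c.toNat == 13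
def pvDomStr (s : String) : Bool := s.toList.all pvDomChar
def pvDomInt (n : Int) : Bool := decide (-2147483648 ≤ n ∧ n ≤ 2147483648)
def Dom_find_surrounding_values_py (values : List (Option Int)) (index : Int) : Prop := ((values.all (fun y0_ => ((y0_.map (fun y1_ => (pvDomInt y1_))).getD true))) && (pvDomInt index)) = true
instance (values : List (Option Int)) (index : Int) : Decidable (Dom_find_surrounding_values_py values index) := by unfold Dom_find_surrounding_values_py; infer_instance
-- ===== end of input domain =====

-- B replaces A's two bounded directional index scans with one enumerate pass that
-- builds an index table of the non-None entries (alternative decomposition, same cost).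

-- ===== PORT A =====
-- scanA walks a list of candidate indices j in order and returns (values[j], j) for
-- the first j whose element is not None ('break'); when values[j] is out of range the
-- Python raises IndexError — those inputs are excluded by Pre_, here the scan just continues.
def scanA (values : List (Option Int)) : List Int → Option Int × Option Int
  | [] => (none, none)
  | j :: js =>
      match PySem.List.pyGet? values j with
      | some (some v) => (some v, some j)
      | _ => scanA values js

def find_surrounding_values_py (values : List (Option Int)) (index : Int) : Option Int × Option Int × Option Int × Option Int :=
  -- for j in range(index - 1, -1, -1): …
  let p := scanA values (PySem.List.pyRange (index - 1) (-1) (-1))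
  -- for j in range(index + 1, len(values)): …
  let q := scanA values (PySem.List.pyRange (index + 1) (values.length : Int) 1)
  (p.1, p.2, q.1, q.2)

-- ===== PORT B =====
def pairOutB (o : Option (Int × Option Int)) : Option Int × Option Int :=
  match o with
  | some p => (p.2, some p.1)
  | none => (none, none)

def find_surrounding_values_py_alt (values : List (Option Int)) (index : Int) : Option Int × Option Int × Option Int × Option Int :=
  let known := (PySem.List.enumerate values 0).filter (fun p => p.2.isSome)
  let before := known.filter (fun p => p.1 < index)
  let after := known.filter (fun p => index < p.1)
  let p := pairOutB before.getLast?
  let q := pairOutB after.head?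
  (p.1, p.2, q.1, q.2)

-- ===== PRECONDITION & SPEC =====
-- Pre_ is exactly the set of inputs on which A returns (outside it A's scans subscript
-- out of range and raise IndexError).
def Pre_find_surrounding_values_py (values : List (Option Int)) (index : Int) : Prop :=
  -((values.length : Int) + 1) ≤ index ∧ index ≤ (values.length : Int)
instance (values : List (Option Int)) (index : Int) : Decidable (Pre_find_surrounding_values_py values index) := by unfold Pre_find_surrounding_values_py; infer_instance

def pvWitness_find_surrounding_values_py : List (Option Int) × Int := ([none, some 1, none, some 2], 2)

-- For index ≤ -2 with a non-None value among the positions A's wrapped forward scan visits,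
-- A returns that wrapped element with a NEGATIVE next index (negative-index wraparound
-- artefact); B returns the first non-None entry with its true non-negative position, the
-- intended 'next value after the index'.
def D_find_surrounding_values_py (values : List (Option Int)) (index : Int) : Prop :=
  index ≤ -2 ∧ (values.drop (((values.length : Int) + index + 1).toNat)).any Option.isSome = true
instance (values : List (Option Int)) (index : Int) : Decidable (D_find_surrounding_values_py values index) := by unfold D_find_surrounding_values_py; infer_instance

def Spec_find_surrounding_values_py (values : List (Option Int)) (index : Int) (out : Option Int × Option Int × Option Int × Option Int) : Prop := ¬ D_find_surrounding_values_py values index → out = find_surrounding_values_py_alt values index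
instance (values : List (Option Int)) (index : Int) (out : Option Int × Option Int × Option Int × Option Int) : Decidable (Spec_find_surrounding_values_py values index out) := by unfold Spec_find_surrounding_values_py; infer_instance

def pvDiffWitness_find_surrounding_values_py : List (Option Int) × Int := ([some 5], -2)
def pvDiffWitnessOut_find_surrounding_values_py : (Option Int × Option Int × Option Int × Option Int) × (Option Int × Option Int × Option Int × Option Int) :=
  ((none, none, some 5, some (-1)), (none, none, some 5, some 0))

-- ===== CLAIM (what is proved, stated in full; the proofs are below) =====
def Claim_unchanged_find_surrounding_values_py : Prop := ∀ (values : List (Option Int)) (index : Int), Dom_find_surrounding_values_py values index → Pre_find_surrounding_values_py values index → Spec_find_surrounding_values_py values index (find_surrounding_values_py values index)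
def Claim_changed_find_surrounding_values_py : Prop := Dom_find_surrounding_values_py (pvDiffWitness_find_surrounding_values_py.1) (pvDiffWitness_find_surrounding_values_py.2) ∧ Pre_find_surrounding_values_py (pvDiffWitness_find_surrounding_values_py.1) (pvDiffWitness_find_surrounding_values_py.2) ∧ D_find_surrounding_values_py (pvDiffWitness_find_surrounding_values_py.1) (pvDiffWitness_find_surrounding_values_py.2) ∧ find_surrounding_values_py (pvDiffWitness_find_surrounding_values_py.1) (pvDiffWitness_find_surrounding_values_py.2) = pvDiffWitnessOut_find_surrounding_values_py.1 ∧ find_surrounding_values_py_alt (pvDiffWitness_find_surrounding_values_py.1) (pvDiffWitness_find_surrounding_values_py.2) = pvDiffWitnessOut_find_surrounding_values_py.2 ∧ pvDiffWitnessOut_find_surrounding_values_py.1 ≠ pvDiffWitnessOut_find_surrounding_values_py.2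
def Claim_exact_find_surrounding_values_py : Prop := ∀ (values : List (Option Int)) (index : Int), Dom_find_surrounding_values_py values index → Pre_find_surrounding_values_py values index → D_find_surrounding_values_py values index → find_surrounding_values_py values index ≠ find_surrounding_values_py_alt values index

-- ===== LEMMAS AND PROOFS =====

-- indices produced by enumerate lie in [s, s + len)
theorem enum_fst_bounds {alpha : Type} (xs : List alpha) (s : Int) (p : Int × alpha)
    (hp : p ∈ PySem.List.enumerate xs s) : s ≤ p.1 ∧ p.1 < s + xs.length := by
  rw [PySem.List.mem_enumerate_iff] at hp
  obtain ⟨k, hk, rfl⟩ := hp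
  simp
  omega

theorem scanA_cons (values : List (Option Int)) (j : Int) (js : List Int) :
    scanA values (j :: js) =
      match PySem.List.pyGet? values j with
      | some (some v) => (some v, some j)
      | _ => scanA values js := rfl

theorem scanA_congr (a b : List (Option Int)) :
    ∀ (js : List Int), (∀ j ∈ js, PySem.List.pyGet? a j = PySem.List.pyGet? b j) →
      scanA a js = scanA b js
  | [], _ => rfl
  | j :: js, h => by
    have hj := h j (by simp)
    have ih := scanA_congr a b js (fun x hx => h x (by simp [hx]))
    rw [scanA_cons, scanA_cons, hj]
    cases PySem.List.pyGet? b j with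
    | none => exact ih
    | some o => cases o with
      | none => exact ih
      | some v => rfl

theorem scanA_miss_append (values : List (Option Int)) :
    ∀ (l1 l2 : List Int), (∀ j ∈ l1, ∀ v : Int, PySem.List.pyGet? values j ≠ some (some v)) →
      scanA values (l1 ++ l2) = scanA values l2
  | [], _, _ => rfl
  | j :: l1, l2, h => by
    have hrest := scanA_miss_append values l1 l2 (fun x hx => h x (by simp [hx]))
    show scanA values (j :: (l1 ++ l2)) = _
    rw [scanA_cons]
    cases hg : PySem.List.pyGet? values j with
    | none => exact hrest
    | some o => cases o with
      | none => exact hrest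
      | some v => exact absurd hg (h j (by simp) v)

theorem scanA_snd_mem (values : List (Option Int)) :
    ∀ (js : List Int) (j : Int), (scanA values js).2 = some j → j ∈ js
  | [], j, h => by simp [scanA] at h
  | i :: js, j, h => by
    revert h
    rw [scanA_cons]
    cases PySem.List.pyGet? values i with
    | none => exact fun h => List.mem_cons_of_mem _ (scanA_snd_mem values js j h)
    | some o => cases o with
      | none => exact fun h => List.mem_cons_of_mem _ (scanA_snd_mem values js j h)
      | some v => intro h; simp at h; simp [h]

theorem scanA_hit (values : List (Option Int)) :
    ∀ (js : List Int), (∃ j ∈ js, ∃ v : Int, PySem.List.pyGet? values j = some (some v)) →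
      (scanA values js).2.isSome
  | [], h => by simp at h
  | i :: js, h => by
    rw [scanA_cons]
    cases hg : PySem.List.pyGet? values i with
    | none =>
      rcases h with ⟨j, hj, v, hv⟩
      rcases List.mem_cons.mp hj with rfl | hj'
      · simp [hg] at hv
      · exact scanA_hit values js ⟨j, hj', v, hv⟩
    | some o => cases o with
      | none =>
        rcases h with ⟨j, hj, v, hv⟩
        rcases List.mem_cons.mp hj with rfl | hj'
        · simp [hg] at hv
        · exact scanA_hit values js ⟨j, hj', v, hv⟩
      | some v => rfl

theorem scanA_append_of_isSome (values : List (Option Int)) :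
    ∀ (l1 l2 : List Int), (scanA values l1).2.isSome →
      scanA values (l1 ++ l2) = scanA values l1
  | [], _, h => by simp [scanA] at h
  | i :: l1, l2, h => by
    revert h
    show (scanA values (i :: l1)).2.isSome →
      scanA values (i :: (l1 ++ l2)) = scanA values (i :: l1)
    rw [scanA_cons, scanA_cons]
    cases PySem.List.pyGet? values i with
    | none => exact fun h => scanA_append_of_isSome values l1 l2 h
    | some o => cases o with
      | none => exact fun h => scanA_append_of_isSome values l1 l2 h
      | some v => exact fun _ => rfl

-- A's backward scan over a whole list equals the last non-None entry of its enumeration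
theorem scanA_back : ∀ (xs : List (Option Int)),
    scanA xs (PySem.List.pyRange ((xs.length : Int) - 1) (-1) (-1)) =
    pairOutB (((PySem.List.enumerate xs 0).filter (fun p => p.2.isSome)).getLast?) := by
  intro xs
  induction xs using List.reverseRecOn with
  | nil =>
    rw [PySem.List.pyRange_neg_one_eq_nil (by simp)]
    simp [scanA, pairOutB]
  | append_singleton xs x ih =>
    have e1 : (((xs ++ [x]).length : Int) - 1) = (xs.length : Int) := by simp
    have hget : PySem.List.pyGet? (xs ++ [x]) ((xs.length : Int)) = some x := by
      rw [PySem.List.pyGet?_natCast]; exact List.getElem?_concat_length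
    have henum : PySem.List.enumerate (xs ++ [x]) 0 =
        PySem.List.enumerate xs 0 ++ [((xs.length : Int), x)] := by
      rw [PySem.List.enumerate_append]
      simp [PySem.List.enumerate_cons, PySem.List.enumerate_nil]
    have hcg : scanA (xs ++ [x]) (PySem.List.pyRange ((xs.length : Int) - 1) (-1) (-1)) =
        scanA xs (PySem.List.pyRange ((xs.length : Int) - 1) (-1) (-1)) := by
      apply scanA_congr
      intro j hj
      rw [PySem.List.mem_pyRange_neg_one] at hj
      rw [PySem.List.pyGet?_of_nonneg _ (by omega), PySem.List.pyGet?_of_nonneg _ (by omega)]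
      exact List.getElem?_append_left (by omega)
    rw [e1, PySem.List.pyRange_neg_one_cons (by omega), scanA_cons, hget, henum]
    cases x with
    | some v => simp [List.filter_append, pairOutB]
    | none =>
      show scanA (xs ++ [none]) _ = _
      rw [hcg, ih]
      simp [List.filter_append]

-- A's forward scan from position a equals the first non-None entry of the enumerated tail
theorem scanA_fwd (values : List (Option Int)) :
    ∀ (n a : Nat), a + n = values.length →
      scanA values (PySem.List.pyRange (a : Int) (values.length : Int) 1) =
      pairOutB (((PySem.List.enumerate (values.drop a) (a : Int)).filter
        (fun p => p.2.isSome)).head?)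
  | 0, a, h => by
    rw [PySem.List.pyRange_one_eq_nil (by omega), List.drop_of_length_le (by omega)]
    simp [scanA, PySem.List.enumerate_nil, pairOutB]
  | n + 1, a, h => by
    have ha : a < values.length := by omega
    rw [PySem.List.pyRange_one_cons (by exact_mod_cast ha)]
    unfold scanA
    rw [show PySem.List.pyGet? values (a : Int) = some values[a] by
      rw [PySem.List.pyGet?_natCast]; exact List.getElem?_eq_getElem ha]
    rw [List.drop_eq_getElem_cons ha, PySem.List.enumerate_cons]
    have ecast : ((a : Int) + 1) = ((a + 1 : Nat) : Int) := by push_cast; ring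
    cases hx : values[a] with
    | some v => simp [pairOutB]
    | none =>
      rw [List.filter_cons]
      simp only [Option.isSome_none]
      rw [ecast]
      exact scanA_fwd values n (a + 1) (by omega)

-- splitting the enumeration of values at position i
theorem enum_split (values : List (Option Int)) (i : Nat) (hi : i ≤ values.length) :
    PySem.List.enumerate values 0 =
    PySem.List.enumerate (values.take i) 0 ++
      PySem.List.enumerate (values.drop i) (i : Int) := by
  conv_lhs => rw [← List.take_append_drop i values]
  rw [PySem.List.enumerate_append]
  congr 1
  rw [List.length_take, Nat.min_eq_left hi]
  simp

-- prev side for a non-negative index i ≤ len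
theorem prev_eq_nonneg (values : List (Option Int)) (i : Nat) (hi : i ≤ values.length) :
    scanA values (PySem.List.pyRange ((i : Int) - 1) (-1) (-1)) =
    pairOutB ((((PySem.List.enumerate values 0).filter (fun p => p.2.isSome)).filter
      (fun p => p.1 < (i : Int))).getLast?) := by
  have h1 : scanA values (PySem.List.pyRange ((i : Int) - 1) (-1) (-1)) =
      scanA (values.take i) (PySem.List.pyRange ((i : Int) - 1) (-1) (-1)) := by
    apply scanA_congr
    intro j hj
    rw [PySem.List.mem_pyRange_neg_one] at hj
    rw [PySem.List.pyGet?_of_nonneg _ (by omega), PySem.List.pyGet?_of_nonneg _ (by omega)]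
    exact (List.getElem?_take_of_lt (by omega)).symm
  have e1 : ((i : Int) - 1) = (((values.take i).length : Int) - 1) := by
    rw [List.length_take, Nat.min_eq_left hi]
  rw [h1, e1, scanA_back]
  congr 2
  rw [enum_split values i hi, List.filter_append, List.filter_append]
  have hB : ((PySem.List.enumerate (values.drop i) (i : Int)).filter
      (fun p => p.2.isSome)).filter (fun p => decide (p.1 < (i : Int))) = [] := by
    rw [List.filter_eq_nil_iff]
    intro p hp
    have hb := enum_fst_bounds _ _ p (List.mem_of_mem_filter hp)
    simp
    omega
  have hA : ((PySem.List.enumerate (values.take i) 0).filter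
      (fun p => p.2.isSome)).filter (fun p => decide (p.1 < (i : Int))) =
      (PySem.List.enumerate (values.take i) 0).filter (fun p => p.2.isSome) := by
    rw [List.filter_eq_self]
    intro p hp
    have hb := enum_fst_bounds _ _ p (List.mem_of_mem_filter hp)
    have htk : (values.take i).length ≤ i := by simp
    simp
    omega
  rw [hB, hA, List.append_nil]

-- next side for a non-negative index i < len
theorem next_eq_nonneg (values : List (Option Int)) (i : Nat) (hi : i < values.length) :
    scanA values (PySem.List.pyRange ((i : Int) + 1) (values.length : Int) 1) =
    pairOutB ((((PySem.List.enumerate values 0).filter (fun p => p.2.isSome)).filter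
      (fun p => (i : Int) < p.1)).head?) := by
  have ecast : ((i : Int) + 1) = ((i + 1 : Nat) : Int) := by push_cast; ring
  rw [ecast, scanA_fwd values (values.length - (i + 1)) (i + 1) (by omega)]
  congr 2
  rw [enum_split values (i + 1) (by omega), List.filter_append, List.filter_append]
  have hA : ((PySem.List.enumerate (values.take (i + 1)) 0).filter
      (fun p => p.2.isSome)).filter (fun p => decide ((i : Int) < p.1)) = [] := by
    rw [List.filter_eq_nil_iff]
    intro p hp
    have hb := enum_fst_bounds _ _ p (List.mem_of_mem_filter hp)
    have htk : (values.take (i + 1)).length ≤ i + 1 := by simp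
    simp
    omega
  have hB : ((PySem.List.enumerate (values.drop (i + 1)) ((i + 1 : Nat) : Int)).filter
      (fun p => p.2.isSome)).filter (fun p => decide ((i : Int) < p.1)) =
      (PySem.List.enumerate (values.drop (i + 1)) ((i + 1 : Nat) : Int)).filter
        (fun p => p.2.isSome) := by
    rw [List.filter_eq_self]
    intro p hp
    have hb := enum_fst_bounds _ _ p (List.mem_of_mem_filter hp)
    simp
    omega
  rw [hA, hB, List.nil_append]

-- elements of the wrapped part of the forward scan are all None when ¬ D_
theorem miss_of_notD (values : List (Option Int)) (index : Int)
    (hlo : -((values.length : Int) + 1) ≤ index)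
    (hnd : ¬ D_find_surrounding_values_py values index) :
    ∀ j ∈ PySem.List.pyRange (index + 1) 0 1, ∀ v : Int,
      PySem.List.pyGet? values j ≠ some (some v) := by
  intro j hj v hv
  rw [PySem.List.mem_pyRange_one] at hj
  have hidx2 : index ≤ -2 := by omega
  have hall : (values.drop (((values.length : Int) + index + 1).toNat)).any Option.isSome = false := by
    cases hx : (values.drop (((values.length : Int) + index + 1).toNat)).any Option.isSome with
    | false => rfl
    | true => exact absurd ⟨hidx2, hx⟩ hnd
  have hjk : j = -(((-j).toNat : Int)) := by omega
  rw [hjk, PySem.List.pyGet?_neg_natCast _ _ (by omega) (by omega)] at hv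
  rw [List.getElem?_eq_some_iff] at hv
  obtain ⟨hlt, hv⟩ := hv
  have hmem : (some v) ∈ values.drop (((values.length : Int) + index + 1).toNat) := by
    rw [List.mem_iff_getElem]
    refine ⟨values.length - (-j).toNat - (((values.length : Int) + index + 1).toNat), by simp; omega, ?_⟩
    rw [List.getElem_drop]
    rw [← hv]
    congr 1
    omega
  rw [List.any_eq_false] at hall
  exact hall _ hmem (by simp)

theorem main_eq (values : List (Option Int)) (index : Int)
    (hpre : Pre_find_surrounding_values_py values index)
    (hnd : ¬ D_find_surrounding_values_py values index) :
    find_surrounding_values_py values index = find_surrounding_values_py_alt values index := by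
  obtain ⟨hlo, hhi⟩ := hpre
  simp only [find_surrounding_values_py, find_surrounding_values_py_alt]
  by_cases hneg : 0 ≤ index
  · obtain ⟨i, rfl⟩ : ∃ i : Nat, index = (i : Int) := ⟨index.toNat, (Int.toNat_of_nonneg hneg).symm⟩
    have hiL : i ≤ values.length := by exact_mod_cast hhi
    have hp := prev_eq_nonneg values i hiL
    by_cases hiL' : i < values.length
    · rw [hp, next_eq_nonneg values i hiL']
    · rw [hp, PySem.List.pyRange_one_eq_nil (by omega)]
      have hafter : (((PySem.List.enumerate values 0).filter (fun p => p.2.isSome)).filter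
          (fun p => (i : Int) < p.1)) = [] := by
        rw [List.filter_eq_nil_iff]
        intro p hp'
        have hb := enum_fst_bounds _ _ p (List.mem_of_mem_filter hp')
        simp
        omega
      rw [hafter]
      simp [scanA, pairOutB]
  · replace hneg : index < 0 := by omega
    have hprev : scanA values (PySem.List.pyRange (index - 1) (-1) (-1)) = (none, none) := by
      rw [PySem.List.pyRange_neg_one_eq_nil (by omega)]
      rfl
    have hbefore : (((PySem.List.enumerate values 0).filter (fun p => p.2.isSome)).filter
        (fun p => p.1 < index)) = [] := by
      rw [List.filter_eq_nil_iff]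
      intro p hp'
      have hb := enum_fst_bounds _ _ p (List.mem_of_mem_filter hp')
      simp
      omega
    have hnext : scanA values (PySem.List.pyRange (index + 1) (values.length : Int) 1) =
        pairOutB ((((PySem.List.enumerate values 0).filter (fun p => p.2.isSome)).filter
          (fun p => index < p.1)).head?) := by
      rw [PySem.List.pyRange_one_append (index + 1) 0 (values.length : Int) (by omega) (by omega)]
      rw [scanA_miss_append values _ _ (miss_of_notD values index hlo hnd)]
      have hfwd := scanA_fwd values values.length 0 (by omega)
      simp only [Nat.cast_zero, List.drop_zero] at hfwd
      rw [hfwd]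
      congr 2
      symm
      rw [List.filter_eq_self]
      intro p hp'
      have hb := enum_fst_bounds _ _ p (List.mem_of_mem_filter hp')
      simp
      omega
    rw [hprev, hnext, hbefore]
    simp [pairOutB]

theorem tight_main (values : List (Option Int)) (index : Int)
    (hpre : Pre_find_surrounding_values_py values index)
    (hD : D_find_surrounding_values_py values index) :
    find_surrounding_values_py values index ≠ find_surrounding_values_py_alt values index := by
  obtain ⟨hlo, hhi⟩ := hpre
  obtain ⟨hidx, hany⟩ := hD
  rw [List.any_eq_true] at hany
  obtain ⟨x, hxmem, hxsome⟩ := hany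
  obtain ⟨k, hk, hxk⟩ := List.mem_iff_getElem.mp hxmem
  obtain ⟨v, hv⟩ := Option.isSome_iff_exists.mp hxsome
  have hmL : (((values.length : Int) + index + 1).toNat : Int) = (values.length : Int) + index + 1 := by
    omega
  have hkL : ((values.length : Int) + index + 1).toNat + k < values.length := by
    have hlen : k < values.length - ((values.length : Int) + index + 1).toNat := by
      simpa [List.length_drop] using hk
    omega
  -- the hit index in the wrapped segment, as a negative Python index
  have hhit : ∃ j ∈ PySem.List.pyRange (index + 1) 0 1, ∃ w : Int,
      PySem.List.pyGet? values j = some (some w) := by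
    refine ⟨-(((values.length - (((values.length : Int) + index + 1).toNat + k) : Nat) : Int)),
      ?_, v, ?_⟩
    · rw [PySem.List.mem_pyRange_one]
      omega
    · rw [PySem.List.pyGet?_neg_natCast _ _ (by omega) (by omega)]
      rw [show values.length - (values.length - ((((values.length : Int) + index + 1).toNat) + k)) =
        (((values.length : Int) + index + 1).toNat) + k by omega]
      rw [← List.getElem?_drop, List.getElem?_eq_getElem hk, hxk, hv]
  have hisS := scanA_hit values _ hhit
  obtain ⟨j0, hj0⟩ := Option.isSome_iff_exists.mp hisS
  have hj0neg : j0 < 0 := by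
    have := scanA_snd_mem values _ _ hj0
    rw [PySem.List.mem_pyRange_one] at this
    omega
  intro heq
  have h4 := congrArg (fun t : Option Int × Option Int × Option Int × Option Int => t.2.2.2) heq
  simp only [find_surrounding_values_py, find_surrounding_values_py_alt] at h4
  rw [PySem.List.pyRange_one_append (index + 1) 0 (values.length : Int) (by omega) (by omega),
    scanA_append_of_isSome values _ _ hisS, hj0] at h4
  cases hlist : (((PySem.List.enumerate values 0).filter (fun p => p.2.isSome)).filter
      (fun p => index < p.1)) with
  | nil => rw [hlist] at h4; simp [pairOutB] at h4
  | cons q rest =>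
    rw [hlist] at h4
    simp only [List.head?_cons, pairOutB] at h4
    have hqmem : q ∈ (((PySem.List.enumerate values 0).filter (fun p => p.2.isSome)).filter
        (fun p => index < p.1)) := by rw [hlist]; exact List.mem_cons_self
    have hb := enum_fst_bounds _ _ q
      (List.mem_of_mem_filter (List.mem_of_mem_filter hqmem))
    have : j0 = q.1 := by simpa using h4
    omega

-- ===== VERDICT (by name: the statement is the Claim_ definition above) =====
theorem find_surrounding_values_py_spec : Claim_unchanged_find_surrounding_values_py := by
  intro values index _ hpre hnd
  exact main_eq values index hpre hnd

theorem find_surrounding_values_py_changed : Claim_changed_find_surrounding_values_py := by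
  unfold Claim_changed_find_surrounding_values_py; decide

theorem find_surrounding_values_py_tight : Claim_exact_find_surrounding_values_py := by
  intro values index _ hpre hD
  exact tight_main values index hpre hD
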